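-- pv_equiv track=rewrite | github.com/andrewcho-dev/opsconductor-ng | pipeline/stages/stage_d/response_formatter.py | _format_single_asset
-- ===== SOURCE A (Python) =====
-- from typing import Dict, Any, List, Optional
--
-- def _format_single_asset(asset: Dict[str, Any]) -> str:
--     """Format a single asset result."""
--     lines = ["Asset found:\n"]
--
--     # Rank fields by importance for display
--     important_fields = ["hostname", "ip_address", "environment", "status", "os_type", "service_type"]
--     other_fields = [k for k in asset.keys() if k not in important_fields and not k.startswith("_")]
--
--     # Display important fields first
--     for field in important_fields:
--         if field in asset and asset[field]:
--             lines.append(f"  {field}: {asset[field]}")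
--
--     # Display other fields
--     for field in sorted(other_fields):
--         if asset[field]:
--             lines.append(f"  {field}: {asset[field]}")
--
--     return "\n".join(lines)
-- ===== SOURCE B (Python) =====
-- def _format_single_asset(asset):
--     """Format a single asset result."""
--     important_fields = ["hostname", "ip_address", "environment", "status", "os_type", "service_type"]
--     order = {f: i for i, f in enumerate(important_fields)}
--     lines = ["Asset found:\n"]
--     for field in sorted((k for k in asset if not k.startswith("_")),
--                         key=lambda k: (order.get(k, len(order)), k)):
--         if asset[field]:
--             lines.append(f"  {field}: {asset[field]}")
--     return "\n".join(lines)
-- ===== Notes on version B (the rewrite author's own statement) =====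
-- stated objective: simpler
-- what changed: Replaced A's two ordered emission passes (fixed important-field scan plus a separate sort of the rest) by one pass: a rank table over the important fields and a single composite-key sort (rank, name) of all non-underscore keys, emitted in one loop.
import Mathlib
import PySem

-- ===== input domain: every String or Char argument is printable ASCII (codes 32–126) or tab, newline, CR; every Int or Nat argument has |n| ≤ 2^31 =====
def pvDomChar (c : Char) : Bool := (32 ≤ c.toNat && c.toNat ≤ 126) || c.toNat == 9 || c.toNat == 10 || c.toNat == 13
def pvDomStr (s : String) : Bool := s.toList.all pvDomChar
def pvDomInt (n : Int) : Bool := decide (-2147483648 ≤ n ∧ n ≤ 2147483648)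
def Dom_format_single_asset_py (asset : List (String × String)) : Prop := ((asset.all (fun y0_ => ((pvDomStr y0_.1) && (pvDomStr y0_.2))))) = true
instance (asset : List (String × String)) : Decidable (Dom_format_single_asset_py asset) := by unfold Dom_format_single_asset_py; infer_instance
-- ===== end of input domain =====

-- B merges A's two ordered emission passes into one rank-table-plus-sort pass (objective: simpler).

-- ===== PORT A =====
-- the dict argument is modelled as the insertion-ordered dict built from the pair list (Python dict semantics)
def format_single_asset_py (asset : List (String × String)) : String :=
  let d := PySem.Dict.ofList asset
  let lines : List String := ["Asset found:\n"]
  let important_fields : List String :=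
    ["hostname", "ip_address", "environment", "status", "os_type", "service_type"]
  let other_fields : List String :=
    d.keys.filter (fun k => !(important_fields.contains k) && !(PySem.Str.startswith k "_"))
  -- `field in asset and asset[field]`: containment test plus truthiness of the string value
  -- (asset[field] ported as getD; the key is present whenever the value is read)
  let lines := important_fields.foldl
    (fun acc field =>
      if d.contains field && (d.getD field "" != "") then
        acc ++ ["  " ++ field ++ ": " ++ d.getD field ""]
      else acc) lines
  let lines := (PySem.List.sorted other_fields (fun k => k) false).foldl
    (fun acc field =>
      if d.getD field "" != "" then
        acc ++ ["  " ++ field ++ ": " ++ d.getD field ""]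
      else acc) lines
  PySem.Str.join "\n" lines

-- ===== PORT B =====
def format_single_asset_py_alt (asset : List (String × String)) : String :=
  let d := PySem.Dict.ofList asset
  let important_fields : List String :=
    ["hostname", "ip_address", "environment", "status", "os_type", "service_type"]
  let order : PySem.Dict String Int :=
    (PySem.List.enumerate important_fields).foldl
      (fun o p => o.insert p.2 p.1) PySem.Dict.empty
  let lines : List String := ["Asset found:\n"]
  let lines := (PySem.List.sorted2
      (d.keys.filter (fun k => !(PySem.Str.startswith k "_")))
      (fun k => order.getD k (order.size : Int)) (fun k => k) false).foldl
    (fun acc field =>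
      if d.getD field "" != "" then
        acc ++ ["  " ++ field ++ ": " ++ d.getD field ""]
      else acc) lines
  PySem.Str.join "\n" lines

-- ===== PRECONDITION & SPEC =====
def Spec_format_single_asset_py (asset : List (String × String)) (out : String) : Prop := out = format_single_asset_py_alt asset
instance (asset : List (String × String)) (out : String) : Decidable (Spec_format_single_asset_py asset out) := by unfold Spec_format_single_asset_py; infer_instance

-- ===== CLAIM (what is proved, stated in full; the proofs are below) =====
def Claim_equal_format_single_asset_py : Prop := ∀ (asset : List (String × String)), Dom_format_single_asset_py asset → Spec_format_single_asset_py asset (format_single_asset_py asset)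

-- ===== LEMMAS AND PROOFS =====

def pvImp : List String := ["hostname", "ip_address", "environment", "status", "os_type", "service_type"]
def pvRk (k : String) : Int :=
  if "hostname" = k then 0 else if "ip_address" = k then 1 else if "environment" = k then 2
  else if "status" = k then 3 else if "os_type" = k then 4 else if "service_type" = k then 5 else 6

theorem pv_rk_fun : (fun k => PySem.Dict.getD
    ((PySem.List.enumerate pvImp).foldl (fun o p => o.insert p.2 p.1) PySem.Dict.empty) k
    ((((PySem.List.enumerate pvImp).foldl (fun o p => o.insert p.2 p.1) PySem.Dict.empty).size : Nat) : Int)) = pvRk := by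
  funext k
  rw [show ((PySem.List.enumerate pvImp).foldl (fun o p => o.insert p.2 p.1) PySem.Dict.empty : PySem.Dict String Int)
      = PySem.Dict.mk [("hostname",0),("ip_address",1),("environment",2),("status",3),("os_type",4),("service_type",5)] from rfl]
  simp [PySem.Dict.getD, PySem.Dict.get?_mk_cons, pvRk, PySem.Dict.size]
  split_ifs <;> rfl

theorem pv_imp_nodup : pvImp.Nodup := by decide
theorem pv_imp_pairwise_rk : pvImp.Pairwise (fun a b => pvRk a < pvRk b) := by decide
theorem pv_rk_lt_six {k : String} (h : k ∈ pvImp) : pvRk k < 6 := by fin_cases h <;> decide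
theorem pv_imp_start {k : String} (h : k ∈ pvImp) : PySem.Str.startswith k "_" = false := by fin_cases h <;> decide
theorem pv_rk_eq_six {k : String} (h : k ∉ pvImp) : pvRk k = 6 := by
  simp only [pvImp, List.mem_cons, List.not_mem_nil, or_false, not_or] at h
  obtain ⟨h1,h2,h3,h4,h5,h6⟩ := h
  simp [pvRk, Ne.symm h1, Ne.symm h2, Ne.symm h3, Ne.symm h4, Ne.symm h5, Ne.symm h6]


-- a permutation that is strictly R-sorted equals a list that is reverse-R-unsorted
theorem pv_perm_pairwise_eq {α : Type} (R : α → α → Prop) (l₁ l₂ : List α)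
    (hp : l₁.Perm l₂) (h₁ : l₁.Pairwise R) (h₂ : l₂.Pairwise (fun a b => ¬ R b a)) :
    l₁ = l₂ := by
  induction l₁ generalizing l₂ with
  | nil => exact (hp.symm.eq_nil).symm
  | cons a t ih =>
    cases l₂ with
    | nil => exact absurd hp.eq_nil (by simp)
    | cons b t₂ =>
      by_cases hab : a = b
      · subst hab
        have ht : t.Perm t₂ := hp.cons_inv
        have := ih t₂ ht h₁.tail h₂.tail
        simp [this]
      · have hamem : a ∈ t₂ := by
          have : a ∈ b :: t₂ := hp.mem_iff.mp (by simp)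
          simpa [hab] using this
        have hbmem : b ∈ t := by
          have : b ∈ a :: t := hp.mem_iff.mpr (by simp)
          simpa [Ne.symm hab] using this
        have hR : R a b := (List.pairwise_cons.mp h₁).1 b hbmem
        have hnR : ¬ R a b := (List.pairwise_cons.mp h₂).1 a hamem
        exact absurd hR hnR

theorem pv_insertBy_pairwise {α : Type} (before : α → α → Bool)
    (hasym : ∀ a b, before a b = true → before b a = false)
    (htr : ∀ a b c, before a b = true → before c b = false → before c a = false)
    (x : α) (ys : List α) (h : ys.Pairwise (fun a b => before b a = false)) :
    (PySem.List.insertBy before x ys).Pairwise (fun a b => before b a = false) := by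
  induction ys with
  | nil => simp [PySem.List.insertBy]
  | cons y ys ih =>
    rcases hby : before x y with _ | _
    · have hres : PySem.List.insertBy before x (y :: ys) = y :: PySem.List.insertBy before x ys := by
        simp [PySem.List.insertBy, hby]
      rw [hres, List.pairwise_cons]
      refine ⟨?_, ih h.tail⟩
      intro z hz
      rcases (PySem.List.mem_insertBy _ _ _ _).mp hz with rfl | hz'
      · exact hby
      · exact (List.pairwise_cons.mp h).1 z hz'
    · have hres : PySem.List.insertBy before x (y :: ys) = x :: y :: ys := by
        simp [PySem.List.insertBy, hby]
      rw [hres, List.pairwise_cons]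
      refine ⟨?_, h⟩
      intro z hz
      rcases hz with _ | hz'
      · exact hasym _ _ hby
      · exact htr x y z hby ((List.pairwise_cons.mp h).1 z (by assumption))

theorem pv_foldl_insertBy_pairwise {α : Type} (before : α → α → Bool)
    (hasym : ∀ a b, before a b = true → before b a = false)
    (htr : ∀ a b c, before a b = true → before c b = false → before c a = false)
    (xs : List α) (acc : List α) (h : acc.Pairwise (fun a b => before b a = false)) :
    (xs.foldl (fun acc x => PySem.List.insertBy before x acc) acc).Pairwise
      (fun a b => before b a = false) := by
  induction xs generalizing acc with
  | nil => simpa using h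
  | cons x xs ih => exact ih _ (pv_insertBy_pairwise before hasym htr x acc h)

-- the Python comparator of sorted2 decides the lexicographic strict order
theorem pv_pylt_iff {κ₁ κ₂ : Type} [LinearOrder κ₁] [LinearOrder κ₂]
    (a b : κ₁) (x y : κ₂) :
    (decide (a < b) || !decide (b < a) && decide (x < y)) = true ↔
      (a < b ∨ (a = b ∧ x < y)) := by
  simp only [Bool.or_eq_true, Bool.and_eq_true, Bool.not_eq_true', decide_eq_true_eq,
    decide_eq_false_iff_not, not_lt]
  constructor
  · rintro (h | ⟨h1, h2⟩)
    · exact Or.inl h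
    · rcases lt_or_eq_of_le h1 with h | h
      · exact Or.inl h
      · exact Or.inr ⟨h, h2⟩
  · rintro (h | ⟨h1, h2⟩)
    · exact Or.inl h
    · exact Or.inr ⟨le_of_eq h1, h2⟩

-- any lexicographically strictly increasing rearrangement of xs is sorted2 xs k1 k2
theorem pv_sorted2_eq_of_perm_of_pairwise {α κ₁ κ₂ : Type} [LinearOrder κ₁] [LinearOrder κ₂]
    (xs ys : List α) (k1 : α → κ₁) (k2 : α → κ₂)
    (hperm : ys.Perm xs)
    (hp : ys.Pairwise (fun a b => k1 a < k1 b ∨ (k1 a = k1 b ∧ k2 a < k2 b))) :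
    PySem.List.sorted2 xs k1 k2 false = ys := by
  have hS : (PySem.List.sorted2 xs k1 k2 false).Perm xs := PySem.List.sorted2_perm xs k1 k2 false
  have hperm2 : ys.Perm (PySem.List.sorted2 xs k1 k2 false) := hperm.trans hS.symm
  refine (pv_perm_pairwise_eq _ ys _ hperm2 hp ?_).symm
  have hasym : ∀ a b : α,
      (decide (k1 a < k1 b) || !decide (k1 b < k1 a) && decide (k2 a < k2 b)) = true →
      (decide (k1 b < k1 a) || !decide (k1 a < k1 b) && decide (k2 b < k2 a)) = false := by
    intro a b hab
    rw [pv_pylt_iff] at hab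
    rw [Bool.eq_false_iff, ne_eq, pv_pylt_iff]
    rcases hab with h | ⟨h1, h2⟩
    · rintro (h' | ⟨h1', _⟩)
      · exact absurd h' (lt_asymm h)
      · exact absurd h (by simp [h1'])
    · rintro (h' | ⟨_, h2'⟩)
      · exact absurd h' (by simp [h1])
      · exact absurd h2' (lt_asymm h2)
  have htr : ∀ a b c : α,
      (decide (k1 a < k1 b) || !decide (k1 b < k1 a) && decide (k2 a < k2 b)) = true →
      (decide (k1 c < k1 b) || !decide (k1 b < k1 c) && decide (k2 c < k2 b)) = false →
      (decide (k1 c < k1 a) || !decide (k1 a < k1 c) && decide (k2 c < k2 a)) = false := by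
    intro a b c hab hcb
    rw [pv_pylt_iff] at hab
    rw [Bool.eq_false_iff, ne_eq, pv_pylt_iff] at hcb
    rw [Bool.eq_false_iff, ne_eq, pv_pylt_iff]
    push_neg at hcb ⊢
    rcases hcb with ⟨hcb1, hcb2⟩
    rcases hab with h | ⟨h1, h2⟩
    · refine ⟨le_trans h.le hcb1, ?_⟩
      intro hca
      exact absurd (hca ▸ lt_of_lt_of_le h hcb1) (lt_irrefl _)
    · refine ⟨h1.le.trans hcb1, ?_⟩
      intro hca
      exact h2.le.trans (hcb2 (hca.trans h1))
  show (PySem.List.sorted2 xs k1 k2 false).Pairwise _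
  simp only [PySem.List.sorted2]
  have := pv_foldl_insertBy_pairwise _ hasym htr xs [] (by simp)
  refine this.imp ?_
  intro a b hab
  rw [Bool.eq_false_iff, ne_eq, pv_pylt_iff] at hab
  exact hab

theorem pv_decomp (d : PySem.Dict String String) (hnd : d.keys.Nodup) :
    PySem.List.sorted2 (d.keys.filter (fun k => !(PySem.Str.startswith k "_"))) pvRk (fun k => k) false
    = pvImp.filter (fun k => d.contains k)
      ++ PySem.List.sorted (d.keys.filter (fun k => !(pvImp.contains k) && !(PySem.Str.startswith k "_"))) (fun k => k) false := by
  set impC := pvImp.filter (fun k => d.contains k) with himpC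
  set other := d.keys.filter (fun k => !(pvImp.contains k) && !(PySem.Str.startswith k "_")) with hother
  set sortedO := PySem.List.sorted other (fun k => k) false with hsortedO
  set filtered := d.keys.filter (fun k => !(PySem.Str.startswith k "_")) with hfiltered
  have hfilterednd : filtered.Nodup := hnd.filter _
  have hothernd : other.Nodup := hnd.filter _
  have hsortednd : sortedO.Nodup := ((PySem.List.sorted_perm other (fun k => k) false).symm).nodup hothernd
  -- permutation
  have hperm : (impC ++ sortedO).Perm filtered := by
    have hsplit : (filtered.filter (fun k => pvImp.contains k)
        ++ filtered.filter (fun k => !(pvImp.contains k))).Perm filtered :=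
      List.filter_append_perm _ _
    refine (List.Perm.append ?_ ?_).trans hsplit
    · rw [List.perm_ext_iff_of_nodup (pv_imp_nodup.filter _) ((hfilterednd.filter _))]
      intro a
      simp only [hfiltered, List.mem_filter]
      constructor
      · rintro ⟨ha, hc⟩
        refine ⟨⟨(PySem.Dict.contains_iff_mem_keys d a).mp hc, by rw [pv_imp_start ha]; rfl⟩,
          by simpa using ha⟩
      · rintro ⟨⟨hk, _⟩, hm⟩
        exact ⟨by simpa using hm, (PySem.Dict.contains_iff_mem_keys d a).mpr hk⟩
    · refine (PySem.List.sorted_perm other (fun k => k) false).trans ?_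
      have he : other = filtered.filter (fun k => !(pvImp.contains k)) := by
        rw [hother, hfiltered, List.filter_filter]
      rw [he]
  -- pairwise in the lexicographic strict order
  have hpw : (impC ++ sortedO).Pairwise (fun a b => pvRk a < pvRk b ∨ (pvRk a = pvRk b ∧ a < b)) := by
    rw [List.pairwise_append]
    refine ⟨?_, ?_, ?_⟩
    · exact (List.Pairwise.sublist List.filter_sublist pv_imp_pairwise_rk).imp (fun h => Or.inl h)
    · have hle : sortedO.Pairwise (fun a b => a ≤ b) := PySem.List.sorted_pairwise other (fun k => k)
      have hne : sortedO.Pairwise (fun a b => a ≠ b) := hsortednd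
      refine (hle.and hne).imp_of_mem ?_
      intro a b ha hb hab
      have ha' : a ∉ pvImp := by
        have hm := (List.mem_filter.mp ((PySem.List.mem_sorted _ _ _ _).mp ha)).2
        simp only [Bool.and_eq_true, Bool.not_eq_true'] at hm
        intro hmem
        rw [List.contains_eq_mem, decide_eq_false_iff_not] at hm
        exact hm.1 hmem
      have hb' : b ∉ pvImp := by
        have hm := (List.mem_filter.mp ((PySem.List.mem_sorted _ _ _ _).mp hb)).2
        simp only [Bool.and_eq_true, Bool.not_eq_true'] at hm
        intro hmem
        rw [List.contains_eq_mem, decide_eq_false_iff_not] at hm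
        exact hm.1 hmem
      exact Or.inr ⟨by rw [pv_rk_eq_six ha', pv_rk_eq_six hb'], lt_of_le_of_ne hab.1 hab.2⟩
    · intro a ha b hb
      have ha' : a ∈ pvImp := (List.mem_filter.mp (himpC ▸ ha)).1
      have hb' : b ∉ pvImp := by
        have hm := (List.mem_filter.mp ((PySem.List.mem_sorted _ _ _ _).mp hb)).2
        simp only [Bool.and_eq_true, Bool.not_eq_true'] at hm
        intro hmem
        rw [List.contains_eq_mem, decide_eq_false_iff_not] at hm
        exact hm.1 hmem
      exact Or.inl (by rw [pv_rk_eq_six hb']; exact pv_rk_lt_six ha')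
  exact pv_sorted2_eq_of_perm_of_pairwise _ _ _ _ hperm hpw

theorem pv_final (asset : List (String × String)) :
    format_single_asset_py asset = format_single_asset_py_alt asset := by
  simp only [format_single_asset_py, format_single_asset_py_alt]
  rw [show (["hostname", "ip_address", "environment", "status", "os_type", "service_type"] : List String) = pvImp from rfl]
  rw [pv_rk_fun]
  rw [PySem.List.foldl_append_if, PySem.List.foldl_append_if, PySem.List.foldl_append_if]
  rw [pv_decomp _ (PySem.Dict.nodup_keys_ofList asset)]
  rw [List.filter_append, List.map_append, List.filter_filter]
  rw [List.filter_congr (fun a _ => (Bool.and_comm _ _))]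
  rw [List.append_assoc]

-- ===== VERDICT (by name: the statement is the Claim_ definition above) =====
theorem format_single_asset_py_spec : Claim_equal_format_single_asset_py := by
  intro asset _
  unfold Spec_format_single_asset_py
  exact pv_final asset
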